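-- pv_equiv track=rewrite | github.com/shannonasmith/Agentic-SOC-Investigation-Engine | modules/ai/agent_loop.py | correlate_alerts
-- ===== SOURCE A (Python) =====
-- def correlate_alerts(current_alert, all_alerts):
--     src_ip = current_alert.get("source_ip")
--     dst_ip = current_alert.get("destination_ip")
--     username = current_alert.get("username")
--     alert_id = current_alert.get("alert_id")
--
--     related_by_src = []
--     related_by_dst = []
--     related_by_user = []
--
--     for alert in all_alerts:
--         if alert.get("alert_id") == alert_id:
--             continue
--
--         if src_ip and alert.get("source_ip") == src_ip:
--             related_by_src.append(alert.get("alert_id"))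
--
--         if dst_ip and alert.get("destination_ip") == dst_ip:
--             related_by_dst.append(alert.get("alert_id"))
--
--         if username and alert.get("username") == username:
--             related_by_user.append(alert.get("alert_id"))
--
--     return {
--         "related_by_source_ip": related_by_src,
--         "related_by_destination_ip": related_by_dst,
--         "related_by_username": related_by_user,
--     }
-- ===== SOURCE B (Python) =====
-- def correlate_alerts(current_alert, all_alerts):
--     src_ip = current_alert.get("source_ip")
--     dst_ip = current_alert.get("destination_ip")
--     username = current_alert.get("username")
--     alert_id = current_alert.get("alert_id")
--
--     def related(key, value):
--         return [a.get("alert_id") for a in all_alerts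
--                 if a.get("alert_id") != alert_id and value and a.get(key) == value]
--
--     return {
--         "related_by_source_ip": related("source_ip", src_ip),
--         "related_by_destination_ip": related("destination_ip", dst_ip),
--         "related_by_username": related("username", username),
--     }
-- ===== Notes on version B (the rewrite author's own statement) =====
-- stated objective: simpler
-- what changed: A's single fused loop threading three accumulator lists is replaced by one helper applied three times, each doing an independent filtering comprehension over all_alerts per output key.
import Mathlib
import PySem

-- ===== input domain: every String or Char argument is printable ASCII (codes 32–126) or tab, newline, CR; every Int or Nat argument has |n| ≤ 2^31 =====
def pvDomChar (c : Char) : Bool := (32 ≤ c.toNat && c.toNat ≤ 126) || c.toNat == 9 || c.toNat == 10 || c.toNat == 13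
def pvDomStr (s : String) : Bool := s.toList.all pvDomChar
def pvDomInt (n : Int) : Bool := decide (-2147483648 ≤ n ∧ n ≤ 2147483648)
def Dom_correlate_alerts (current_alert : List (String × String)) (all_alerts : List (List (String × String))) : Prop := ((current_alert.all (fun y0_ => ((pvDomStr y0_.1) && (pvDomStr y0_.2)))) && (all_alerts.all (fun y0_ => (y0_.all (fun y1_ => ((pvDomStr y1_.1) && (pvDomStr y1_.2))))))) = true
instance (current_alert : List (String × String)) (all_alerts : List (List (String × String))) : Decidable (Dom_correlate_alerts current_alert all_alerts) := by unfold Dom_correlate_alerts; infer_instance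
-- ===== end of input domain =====

-- B replaces A's single fused loop (three accumulator lists threaded through one pass) by one
-- filtering comprehension per output key; objective: simpler decomposition, same cost.

-- shared dict primitives (first-match association-list lookup = Python dict.get on these inputs)
def pvGet (d : List (String × String)) (k : String) : Option String :=
  (d.find? (fun p => p.1 == k)).map (·.2)

-- Python truthiness of an Optional[str]
def pvTruthy (o : Option String) : Bool :=
  match o with
  | some s => s ≠ ""
  | none => false

-- alert.get("alert_id") when appended; under Pre_ it is always present (getD unreachable)
def pvAid (a : List (String × String)) : String :=
  (pvGet a "alert_id").getD ""

-- ===== PORT A =====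
-- the body of A's for-loop, one step of the fold over all_alerts
def pvStepA (src dst usr aid : Option String)
    (s : List String × List String × List String) (alert : List (String × String)) :
    List String × List String × List String :=
  if pvGet alert "alert_id" == aid then s
  else
    ( if pvTruthy src && (pvGet alert "source_ip" == src) then s.1 ++ [pvAid alert] else s.1,
      if pvTruthy dst && (pvGet alert "destination_ip" == dst) then s.2.1 ++ [pvAid alert] else s.2.1,
      if pvTruthy usr && (pvGet alert "username" == usr) then s.2.2 ++ [pvAid alert] else s.2.2 )

def correlate_alerts (current_alert : List (String × String)) (all_alerts : List (List (String × String))) : List (String × List String) :=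
  let src := pvGet current_alert "source_ip"
  let dst := pvGet current_alert "destination_ip"
  let usr := pvGet current_alert "username"
  let aid := pvGet current_alert "alert_id"
  let r := all_alerts.foldl (pvStepA src dst usr aid) ([], [], [])
  [("related_by_source_ip", r.1), ("related_by_destination_ip", r.2.1), ("related_by_username", r.2.2)]

-- ===== PORT B =====
-- B's helper 'related': one comprehension over all_alerts for a single key/value pair
def pvRelated (all_alerts : List (List (String × String))) (aid : Option String)
    (key : String) (value : Option String) : List String :=
  all_alerts.filterMap (fun a =>
    if (pvGet a "alert_id" != aid) && pvTruthy value && (pvGet a key == value) then some (pvAid a)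
    else none)

def correlate_alerts_alt (current_alert : List (String × String)) (all_alerts : List (List (String × String))) : List (String × List String) :=
  let aid := pvGet current_alert "alert_id"
  [("related_by_source_ip", pvRelated all_alerts aid "source_ip" (pvGet current_alert "source_ip")),
   ("related_by_destination_ip", pvRelated all_alerts aid "destination_ip" (pvGet current_alert "destination_ip")),
   ("related_by_username", pvRelated all_alerts aid "username" (pvGet current_alert "username"))]

-- ===== PRECONDITION & SPEC =====
-- Pre_ excludes inputs where some correlated alert lacks an "alert_id" key: there Python appends
-- None to a list whose declared element type is str, a value outside the ported return type.
def Pre_correlate_alerts (current_alert : List (String × String)) (all_alerts : List (List (String × String))) : Prop :=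
  ∀ a ∈ all_alerts,
    (pvGet a "alert_id" ≠ pvGet current_alert "alert_id" ∧
      ((pvTruthy (pvGet current_alert "source_ip") ∧ pvGet a "source_ip" = pvGet current_alert "source_ip") ∨
       (pvTruthy (pvGet current_alert "destination_ip") ∧ pvGet a "destination_ip" = pvGet current_alert "destination_ip") ∨
       (pvTruthy (pvGet current_alert "username") ∧ pvGet a "username" = pvGet current_alert "username"))) →
    (pvGet a "alert_id").isSome
instance (current_alert : List (String × String)) (all_alerts : List (List (String × String))) : Decidable (Pre_correlate_alerts current_alert all_alerts) := by unfold Pre_correlate_alerts; infer_instance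

def pvWitness_correlate_alerts : (List (String × String)) × (List (List (String × String))) :=
  ([("alert_id", "1"), ("source_ip", "x")],
   [[("alert_id", "2"), ("source_ip", "x")], [("alert_id", "3"), ("username", "u")]])

def Spec_correlate_alerts (current_alert : List (String × String)) (all_alerts : List (List (String × String))) (out : List (String × List String)) : Prop := out = correlate_alerts_alt current_alert all_alerts
instance (current_alert : List (String × String)) (all_alerts : List (List (String × String))) (out : List (String × List String)) : Decidable (Spec_correlate_alerts current_alert all_alerts out) := by unfold Spec_correlate_alerts; infer_instance

-- ===== CLAIM (what is proved, stated in full; the proofs are below) =====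
def Claim_equal_correlate_alerts : Prop := ∀ (current_alert : List (String × String)) (all_alerts : List (List (String × String))), Dom_correlate_alerts current_alert all_alerts → Pre_correlate_alerts current_alert all_alerts → Spec_correlate_alerts current_alert all_alerts (correlate_alerts current_alert all_alerts)

-- ===== LEMMAS AND PROOFS =====

-- A's fold with accumulator triple = the triple of B's three comprehensions, appended
theorem pv_fold_eq (src dst usr aid : Option String) (l : List (List (String × String)))
    (s : List String × List String × List String) :
    l.foldl (pvStepA src dst usr aid) s =
      (s.1 ++ pvRelated l aid "source_ip" src,
       s.2.1 ++ pvRelated l aid "destination_ip" dst,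
       s.2.2 ++ pvRelated l aid "username" usr) := by
  induction l generalizing s with
  | nil => simp [pvRelated]
  | cons a t ih =>
    rw [List.foldl_cons, ih]
    by_cases h : pvGet a "alert_id" == aid
    · have h' := eq_of_beq h
      simp [pvStepA, pvRelated, List.filterMap_cons, h, h']
    · rw [Bool.not_eq_true] at h
      simp only [pvStepA, pvRelated, List.filterMap_cons, h, bne, Bool.not_false,
        Bool.true_and, Bool.false_eq_true, if_false]
      split_ifs <;> simp_all

theorem correlate_alerts_spec' (current_alert : List (String × String)) (all_alerts : List (List (String × String))) :
    correlate_alerts current_alert all_alerts = correlate_alerts_alt current_alert all_alerts := by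
  simp [correlate_alerts, correlate_alerts_alt, pv_fold_eq]

-- ===== VERDICT (by name: the statement is the Claim_ definition above) =====
theorem correlate_alerts_spec : Claim_equal_correlate_alerts := by
  intro cur alls _ _
  unfold Spec_correlate_alerts
  exact correlate_alerts_spec' cur alls
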